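-- pv_equiv track=rewrite | github.com/jmysliv/macierzowe | p3/src/main.py | merge_matrices
-- ===== SOURCE A (Python) =====
-- def merge_matrices(A, a11, a12, a21, a22):
--     n = len(A)
--     half = n // 2
--     for i in range(n):
--         for j in range(n):
--             if i < half:
--                 if j < half:
--                     A[i][j] = a11[i][j]
--                 else:
--                     A[i][j] = a12[i][j - half]
--             else:
--                 if j < half:
--                     A[i][j] = a21[i - half][j]
--                 else:
--                     A[i][j] = a22[i - half][j - half]
--     return A
-- ===== SOURCE B (Python) =====
-- def merge_matrices(A, a11, a12, a21, a22):
--     # Block-wise assembly: copy each quadrant into its block of A with one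
--     # row-slice assignment per quadrant row, instead of per-cell nested
--     # branching.  Mutates A in place (like the original) and returns it.
--     n = len(A)
--     half = n // 2
--     for i, row in enumerate(a11[:half]):
--         A[i][:half] = row[:half]
--     for i, row in enumerate(a12[:half]):
--         A[i][half:n] = row[:n - half]
--     for i, row in enumerate(a21[:n - half]):
--         A[half + i][:half] = row[:half]
--     for i, row in enumerate(a22[:n - half]):
--         A[half + i][half:n] = row[:n - half]
--     return A
-- ===== Notes on version B (the rewrite author's own statement) =====
-- stated objective: simpler
-- what changed: Replaces the per-cell double loop with nested quadrant branches by four independent block-copy loops, each splicing one quadrant row into its block of A with a single slice assignment.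
import Mathlib
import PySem

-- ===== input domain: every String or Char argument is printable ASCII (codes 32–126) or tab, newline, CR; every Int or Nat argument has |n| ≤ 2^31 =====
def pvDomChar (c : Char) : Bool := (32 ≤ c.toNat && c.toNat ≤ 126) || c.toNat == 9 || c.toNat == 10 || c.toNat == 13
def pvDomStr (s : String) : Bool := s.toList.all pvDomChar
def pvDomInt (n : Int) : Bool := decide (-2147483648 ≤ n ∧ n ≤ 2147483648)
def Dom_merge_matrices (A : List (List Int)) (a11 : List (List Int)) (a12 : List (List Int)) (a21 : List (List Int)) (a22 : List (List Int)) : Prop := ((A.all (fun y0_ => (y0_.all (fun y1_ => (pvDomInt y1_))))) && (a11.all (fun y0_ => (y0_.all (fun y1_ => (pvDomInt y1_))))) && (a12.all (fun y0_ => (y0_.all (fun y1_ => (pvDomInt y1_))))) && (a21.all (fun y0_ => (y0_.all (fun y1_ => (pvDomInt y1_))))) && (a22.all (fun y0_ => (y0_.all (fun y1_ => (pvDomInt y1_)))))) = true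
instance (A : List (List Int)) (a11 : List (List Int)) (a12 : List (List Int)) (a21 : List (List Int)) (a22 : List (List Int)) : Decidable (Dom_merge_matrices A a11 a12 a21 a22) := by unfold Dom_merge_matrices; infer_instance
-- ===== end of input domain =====

-- B copies each quadrant into its block of A with one row-slice assignment per quadrant row
-- (four independent block loops) instead of A's per-cell double loop with nested branches.
-- Both A and B mutate the Python argument A in place; the equivalence proved here is about
-- the return value.

-- ===== PORT A =====
-- A[i][j] = v for the loop's indices (always ≥ 0 here); an out-of-range write (a Python
-- IndexError) is excluded by Pre_merge_matrices and is a no-op here.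
def pvSetCell (M : List (List Int)) (i j : Int) (v : Int) : List (List Int) :=
  M.set i.toNat ((M.getD i.toNat []).set j.toNat v)

def merge_matrices (A : List (List Int)) (a11 : List (List Int)) (a12 : List (List Int)) (a21 : List (List Int)) (a22 : List (List Int)) : List (List Int) :=
  let n : Int := A.length
  let half : Int := PySem.Int.floordiv n 2
  (PySem.List.pyRange 0 n 1).foldl (fun M i =>
    (PySem.List.pyRange 0 n 1).foldl (fun M j =>
      pvSetCell M i j
        (if i < half then
          (if j < half then PySem.List.pyGetD (PySem.List.pyGetD a11 i []) j 0
           else PySem.List.pyGetD (PySem.List.pyGetD a12 i []) (j - half) 0)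
        else
          (if j < half then PySem.List.pyGetD (PySem.List.pyGetD a21 (i - half) []) j 0
           else PySem.List.pyGetD (PySem.List.pyGetD a22 (i - half) []) (j - half) 0))) M) A

-- ===== PORT B =====
-- Each Python row-slice assignment  A[k][a:b] = rhs  (with 0 ≤ a ≤ b here) becomes
-- "row := row[:a] ++ rhs ++ row[b:]" on row k; an out-of-range row index (a Python
-- IndexError) is excluded by Pre_merge_matrices and is a no-op here.
def merge_matrices_alt (A : List (List Int)) (a11 : List (List Int)) (a12 : List (List Int)) (a21 : List (List Int)) (a22 : List (List Int)) : List (List Int) :=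
  let n : Int := A.length
  let half : Int := PySem.Int.floordiv n 2
  let M1 := (PySem.List.enumerate (PySem.List.slice a11 none (some half)) 0).foldl
    (fun M p => M.set p.1.toNat
      (PySem.List.slice p.2 none (some half) ++
       PySem.List.slice (M.getD p.1.toNat []) (some half) none)) A
  let M2 := (PySem.List.enumerate (PySem.List.slice a12 none (some half)) 0).foldl
    (fun M p => M.set p.1.toNat
      (PySem.List.slice (M.getD p.1.toNat []) none (some half) ++
       PySem.List.slice p.2 none (some (n - half)) ++
       PySem.List.slice (M.getD p.1.toNat []) (some n) none)) M1
  let M3 := (PySem.List.enumerate (PySem.List.slice a21 none (some (n - half))) 0).foldl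
    (fun M p => M.set (half + p.1).toNat
      (PySem.List.slice p.2 none (some half) ++
       PySem.List.slice (M.getD (half + p.1).toNat []) (some half) none)) M2
  (PySem.List.enumerate (PySem.List.slice a22 none (some (n - half))) 0).foldl
    (fun M p => M.set (half + p.1).toNat
      (PySem.List.slice (M.getD (half + p.1).toNat []) none (some half) ++
       PySem.List.slice p.2 none (some (n - half)) ++
       PySem.List.slice (M.getD (half + p.1).toNat []) (some n) none)) M3

-- ===== PRECONDITION & SPEC =====
-- Pre_ excludes exactly the inputs on which the Python A raises IndexError: a row of A
-- shorter than len(A), or a quadrant row that A actually reads missing or too short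
-- (a11/a12/a21 are read only when n//2 > 0; a22 whenever n > 0).
def Pre_merge_matrices (A : List (List Int)) (a11 : List (List Int)) (a12 : List (List Int)) (a21 : List (List Int)) (a22 : List (List Int)) : Prop :=
  (∀ r ∈ A, A.length ≤ r.length) ∧
  (0 < A.length →
    A.length - A.length / 2 ≤ a22.length ∧
    (∀ r ∈ a22.take (A.length - A.length / 2), A.length - A.length / 2 ≤ r.length)) ∧
  (0 < A.length / 2 →
    A.length / 2 ≤ a11.length ∧ (∀ r ∈ a11.take (A.length / 2), A.length / 2 ≤ r.length) ∧
    A.length / 2 ≤ a12.length ∧ (∀ r ∈ a12.take (A.length / 2), A.length - A.length / 2 ≤ r.length) ∧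
    A.length - A.length / 2 ≤ a21.length ∧ (∀ r ∈ a21.take (A.length - A.length / 2), A.length / 2 ≤ r.length))

instance (A : List (List Int)) (a11 : List (List Int)) (a12 : List (List Int)) (a21 : List (List Int)) (a22 : List (List Int)) : Decidable (Pre_merge_matrices A a11 a12 a21 a22) := by unfold Pre_merge_matrices; infer_instance

def pvWitness_merge_matrices : List (List Int) × List (List Int) × List (List Int) × List (List Int) × List (List Int) :=
  ([[0, 0], [0, 0]], [[1]], [[2]], [[3]], [[4]])

def Spec_merge_matrices (A : List (List Int)) (a11 : List (List Int)) (a12 : List (List Int)) (a21 : List (List Int)) (a22 : List (List Int)) (out : List (List Int)) : Prop := out = merge_matrices_alt A a11 a12 a21 a22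
instance (A : List (List Int)) (a11 : List (List Int)) (a12 : List (List Int)) (a21 : List (List Int)) (a22 : List (List Int)) (out : List (List Int)) : Decidable (Spec_merge_matrices A a11 a12 a21 a22 out) := by unfold Spec_merge_matrices; infer_instance

-- ===== CLAIM (what is proved, stated in full; the proofs are below) =====
def Claim_equal_merge_matrices : Prop := ∀ (A : List (List Int)) (a11 : List (List Int)) (a12 : List (List Int)) (a21 : List (List Int)) (a22 : List (List Int)), Dom_merge_matrices A a11 a12 a21 a22 → Pre_merge_matrices A a11 a12 a21 a22 → Spec_merge_matrices A a11 a12 a21 a22 (merge_matrices A a11 a12 a21 a22)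

-- ===== LEMMAS AND PROOFS =====

-- Pointwise-equal loop bodies give equal folds.
lemma pv_foldl_congr {α β : Type} (f g : β → α → β) (init : β) (l : List α)
    (h : ∀ acc, ∀ x ∈ l, f acc x = g acc x) : l.foldl f init = l.foldl g init := by
  induction l generalizing init with
  | nil => rfl
  | cons x t ih =>
      simp only [List.foldl_cons]
      rw [h init x (by simp)]
      exact ih _ (fun acc y hy => h acc y (by simp [hy]))

-- Setting position pre.length in (pre ++ x :: rest).
lemma pv_set_append_mid {α : Type} (pre : List α) (x v : α) (rest : List α) :
    (pre ++ x :: rest).set pre.length v = pre ++ v :: rest := by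
  induction pre with
  | nil => simp
  | cons a t ih => simp [ih]

-- Inner j-loop of A only rewrites row k: it hoists to a single row update.
lemma pv_foldl_set_row (l : List Int) (k : Nat) (f : List Int → Int → List Int) :
    ∀ (M : List (List Int)), k < M.length →
    l.foldl (fun M j => M.set k (f (M.getD k []) j)) M = M.set k (l.foldl f (M.getD k [])) := by
  induction l with
  | nil =>
      intro M hk
      rw [List.foldl_nil, List.foldl_nil, List.getD_eq_getElem M [] hk, List.set_getElem_self hk]
  | cons j rest ih =>
      intro M hk
      simp only [List.foldl_cons]
      rw [ih (M.set k (f (M.getD k []) j)) (by simpa using hk)]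
      simp [List.getD_eq_getElem?_getD, List.getElem?_set_self hk, List.set_set]

-- Writing positions 0..m-1 of a row replaces its m-prefix.
lemma pv_foldl_set_range (m : Nat) (g : Nat → Int) :
    ∀ (r : List Int), m ≤ r.length →
    (List.range m).foldl (fun r k => r.set k (g k)) r = (List.range m).map g ++ r.drop m := by
  induction m with
  | zero => intro r _; simp
  | succ m ih =>
      intro r hm
      have hm' : m < r.length := by omega
      rw [List.range_succ, List.foldl_append, List.map_append]
      simp only [List.foldl_cons, List.foldl_nil, List.map_cons, List.map_nil]
      rw [ih r (by omega)]
      have hdrop : r.drop m = r[m] :: r.drop (m + 1) := List.drop_eq_getElem_cons hm'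
      rw [hdrop]
      have hlen : ((List.range m).map g).length = m := by simp
      calc ((List.range m).map g ++ r[m] :: r.drop (m + 1)).set m (g m)
          = ((List.range m).map g ++ r[m] :: r.drop (m + 1)).set ((List.range m).map g).length (g m) := by rw [hlen]
        _ = (List.range m).map g ++ g m :: r.drop (m + 1) := pv_set_append_mid _ _ _ _
        _ = (List.range m).map g ++ ([g m] ++ [] ) ++ r.drop (m + 1) := by simp
        _ = (List.range m).map g ++ [g m] ++ r.drop (m + 1) := by simp

-- The per-cell values of one row segment, read in order, are the two quadrant-row prefixes.
lemma pv_map_range_two_blocks (n h : Nat) (rowL rowR : List Int) (hh : h ≤ n)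
    (hL : h ≤ rowL.length) (hR : n - h ≤ rowR.length) :
    (List.range n).map (fun k => if ((k : Nat) : Int) < (h : Int) then PySem.List.pyGetD rowL ((k : Nat) : Int) 0
        else PySem.List.pyGetD rowR (((k : Nat) : Int) - (h : Int)) 0)
    = rowL.take h ++ rowR.take (n - h) := by
  apply List.ext_getElem
  · simp; omega
  · intro k hk1 hk2
    simp only [List.getElem_map, List.getElem_range]
    have hk : k < n := by simpa using hk1
    by_cases hkh : k < h
    · rw [if_pos (by exact_mod_cast hkh)]
      rw [List.getElem_append_left (by simp; omega)]
      rw [List.getElem_take]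
      rw [PySem.List.pyGetD_natCast]
      exact List.getD_eq_getElem rowL 0 (by omega)
    · rw [if_neg (by omega)]
      have hcast : ((k : Int) - (h : Int)) = ((k - h : Nat) : Int) := by omega
      rw [hcast, PySem.List.pyGetD_natCast]
      rw [List.getElem_append_right (by simp; omega)]
      rw [List.getElem_take]
      rw [List.getD_eq_getElem rowR 0 (by omega)]
      congr 1
      simp [Nat.min_eq_left hL]

-- One row segment: A's per-cell inner loop equals a per-row splice, for every row index
-- of the segment, provided all touched rows are long enough.
lemma pv_seg_eq (n : Nat) (v : Int → Int → Int) (rhs : Int → List Int) :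
    ∀ (idxs : List Int) (M : List (List Int)),
    (∀ i ∈ idxs, 0 ≤ i ∧ i.toNat < M.length) →
    (∀ r ∈ M, n ≤ r.length) →
    (∀ i ∈ idxs, (rhs i).length = n) →
    (∀ i ∈ idxs, (List.range n).map (fun k => v i ((0 : Int) + (k : Nat))) = rhs i) →
    idxs.foldl (fun M i => (PySem.List.pyRange 0 (n : Int) 1).foldl (fun M j => pvSetCell M i j (v i j)) M) M
    = idxs.foldl (fun M i => M.set i.toNat (rhs i ++ (M.getD i.toNat []).drop n)) M := by
  intro idxs
  induction idxs with
  | nil => intro M _ _ _ _; rfl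
  | cons i rest ih =>
      intro M hidx hrow hlen hmap
      simp only [List.foldl_cons]
      have hi := hidx i (List.mem_cons_self)
      have hstep : (PySem.List.pyRange 0 (n : Int) 1).foldl (fun M j => pvSetCell M i j (v i j)) M
          = M.set i.toNat (rhs i ++ (M.getD i.toNat []).drop n) := by
        unfold pvSetCell
        rw [pv_foldl_set_row _ i.toNat (fun r j => r.set j.toNat (v i j)) M hi.2]
        congr 1
        have hrange : PySem.List.pyRange 0 (n : Int) 1 = (List.range n).map (fun k => (0 : Int) + (k : Nat)) := by
          rw [PySem.List.pyRange_one]; simp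
        rw [hrange, List.foldl_map]
        have hbody : ∀ (r : List Int) (k : Nat),
            r.set ((0 : Int) + (k : Nat)).toNat (v i ((0 : Int) + (k : Nat))) = r.set k (v i ((0 : Int) + (k : Nat))) := by
          intro r k; congr 1; simp
        have hrowlen : n ≤ (M.getD i.toNat []).length := by
          apply hrow
          rw [List.getD_eq_getElem M [] hi.2]
          exact List.getElem_mem hi.2
        calc (List.range n).foldl (fun r k => r.set ((0 : Int) + (k : Nat)).toNat (v i ((0 : Int) + (k : Nat)))) (M.getD i.toNat [])
            = (List.range n).foldl (fun r k => r.set k (v i ((0 : Int) + (k : Nat)))) (M.getD i.toNat []) := by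
              exact pv_foldl_congr _ _ _ _ (fun r k _ => hbody r k)
          _ = (List.range n).map (fun k => v i ((0 : Int) + (k : Nat))) ++ (M.getD i.toNat []).drop n :=
              pv_foldl_set_range n _ _ hrowlen
          _ = rhs i ++ (M.getD i.toNat []).drop n := by rw [hmap i (List.mem_cons_self)]
      rw [hstep]
      apply ih
      · intro i' hi'
        refine ⟨(hidx i' (List.mem_cons_of_mem _ hi')).1, ?_⟩
        simpa using (hidx i' (List.mem_cons_of_mem _ hi')).2
      · intro r hr
        rcases List.mem_or_eq_of_mem_set hr with h | h
        · exact hrow r h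
        · subst h
          have : (rhs i).length = n := hlen i (List.mem_cons_self)
          simp [this]
      · intro i' hi'; exact hlen i' (List.mem_cons_of_mem _ hi')
      · intro i' hi'; exact hmap i' (List.mem_cons_of_mem _ hi')

-- getD through drop / take / append / map-range, and take/drop across an append.
lemma pv_getD_drop {α : Type} (l : List α) (n k : Nat) (d : α) :
    (l.drop n).getD k d = l.getD (n + k) d := by
  simp [List.getD_eq_getElem?_getD, List.getElem?_drop]

lemma pv_getD_take {α : Type} (l : List α) (n k : Nat) (d : α) (h : k < n) :
    (l.take n).getD k d = l.getD k d := by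
  simp [List.getD_eq_getElem?_getD, h]

lemma pv_getD_append_left {α : Type} (xs ys : List α) (k : Nat) (d : α) (h : k < xs.length) :
    (xs ++ ys).getD k d = xs.getD k d := by
  simp [List.getD_eq_getElem?_getD, List.getElem?_append_left h]

lemma pv_getD_append_right {α : Type} (xs ys : List α) (k : Nat) (d : α) :
    (xs ++ ys).getD (xs.length + k) d = ys.getD k d := by
  simp [List.getD_eq_getElem?_getD, List.getElem?_append_right (by omega : xs.length ≤ xs.length + k)]

lemma pv_take_append {α : Type} (xs ys : List α) (n : Nat) (h : xs.length = n) :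
    (xs ++ ys).take n = xs := by
  rw [← h, List.take_left]

lemma pv_drop_append {α : Type} (xs ys : List α) (n : Nat) (h : xs.length ≤ n) :
    (xs ++ ys).drop n = ys.drop (n - xs.length) := by
  rw [show (xs ++ ys).drop n = ((xs ++ ys).drop xs.length).drop (n - xs.length) from by
        rw [List.drop_drop]; congr 1; omega,
      List.drop_left]

-- A quadrant row fetched with getD is among the first t rows, so it inherits their length bound.
lemma pv_getD_row_len (l : List (List Int)) (t c k : Nat)
    (hk : k < t) (ht : t ≤ l.length)
    (hr : ∀ r ∈ l.take t, c ≤ r.length) : c ≤ (l.getD k []).length := by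
  rw [List.getD_eq_getElem l [] (by omega)]
  have h1 : k < (l.take t).length := by simp; omega
  have h2 := List.getElem_mem h1
  rw [List.getElem_take] at h2
  exact hr _ h2

-- Writing rows off..off+m-1, each as a function of its index and its current value,
-- replaces that segment of the matrix.
lemma pv_setrows (g : Nat → List Int → List Int) (off : Nat) :
    ∀ (m : Nat) (M : List (List Int)), off + m ≤ M.length →
    (List.range m).foldl (fun M k => M.set (off + k) (g k (M.getD (off + k) []))) M
    = M.take off ++ (List.range m).map (fun k => g k (M.getD (off + k) [])) ++ M.drop (off + m) := by
  intro m
  induction m with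
  | zero =>
      intro M h
      simp [List.take_append_drop]
  | succ m ih =>
      intro M h
      rw [List.range_succ, List.foldl_append, List.map_append]
      simp only [List.foldl_cons, List.foldl_nil, List.map_cons, List.map_nil]
      rw [ih M (by omega)]
      have hlt : off + m < M.length := by omega
      rw [show off + (m + 1) = off + m + 1 from rfl]
      rw [List.drop_eq_getElem_cons hlt]
      rw [← List.getD_eq_getElem M [] hlt]
      rw [← List.append_assoc]
      set x := M.getD (off + m) [] with hx
      set pre := M.take off ++ (List.range m).map (fun k => g k (M.getD (off + k) [])) with hpre
      have hprelen : pre.length = off + m := by simp [hpre]; omega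
      have hget : (pre ++ x :: M.drop (off + m + 1)).getD (off + m) [] = x := by
        rw [show off + m = pre.length + 0 by omega, pv_getD_append_right]
        rfl
      rw [hget]
      rw [show off + m = pre.length from hprelen.symm]
      rw [pv_set_append_mid]
      simp [hpre, List.append_assoc]

-- A fold over enumerate(l) writing row k from the k-th element of l and the row's
-- current value replaces the first len(l) rows.
lemma pv_enum_setrows0 (l : List (List Int)) (f : List Int → List Int → List Int)
    (M : List (List Int)) (hlen : l.length ≤ M.length) :
    (PySem.List.enumerate l 0).foldl
      (fun M p => M.set p.1.toNat (f p.2 (M.getD p.1.toNat []))) M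
    = (List.range l.length).map (fun k => f (l.getD k []) (M.getD k [])) ++ M.drop l.length := by
  rw [PySem.List.enumerate_eq_map_pyRange l ([] : List Int), List.foldl_map]
  have h2 : PySem.List.pyRange 0 (PySem.List.len l) 1 = (List.range l.length).map (fun k => ((0 : Int) + (k : Nat))) := by
    rw [PySem.List.pyRange_one]; simp [PySem.List.len]
  rw [h2, List.foldl_map]
  have hbody : ∀ (M : List (List Int)), ∀ k ∈ List.range l.length,
      M.set ((0 : Int) + (k : Nat)).toNat (f (PySem.List.pyGetD l ((0 : Int) + (k : Nat)) []) (M.getD ((0 : Int) + (k : Nat)).toNat []))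
      = M.set (0 + k) (f (l.getD k []) (M.getD (0 + k) [])) := by
    intro M k _
    have e1 : ((0 : Int) + (k : Nat)).toNat = 0 + k := by omega
    rw [e1]
    congr 1
    rw [zero_add, PySem.List.pyGetD_natCast]
  rw [pv_foldl_congr _ _ _ _ hbody]
  have := pv_setrows (fun k r => f (l.getD k []) r) 0 l.length M (by omega)
  simpa using this

-- The same, writing row off+k instead of row k.
lemma pv_enum_setrows (l : List (List Int)) (off : Nat) (f : List Int → List Int → List Int)
    (M : List (List Int)) (hlen : off + l.length ≤ M.length) :
    (PySem.List.enumerate l 0).foldl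
      (fun M p => M.set (((off : Nat) : Int) + p.1).toNat (f p.2 (M.getD (((off : Nat) : Int) + p.1).toNat []))) M
    = M.take off ++ (List.range l.length).map (fun k => f (l.getD k []) (M.getD (off + k) [])) ++ M.drop (off + l.length) := by
  rw [PySem.List.enumerate_eq_map_pyRange l ([] : List Int), List.foldl_map]
  have h2 : PySem.List.pyRange 0 (PySem.List.len l) 1 = (List.range l.length).map (fun k => ((0 : Int) + (k : Nat))) := by
    rw [PySem.List.pyRange_one]; simp [PySem.List.len]
  rw [h2, List.foldl_map]
  have hbody : ∀ (M : List (List Int)), ∀ k ∈ List.range l.length,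
      M.set (((off : Nat) : Int) + ((0 : Int) + (k : Nat))).toNat (f (PySem.List.pyGetD l ((0 : Int) + (k : Nat)) []) (M.getD (((off : Nat) : Int) + ((0 : Int) + (k : Nat))).toNat []))
      = M.set (off + k) (f (l.getD k []) (M.getD (off + k) [])) := by
    intro M k _
    have e1 : (((off : Nat) : Int) + ((0 : Int) + (k : Nat))).toNat = off + k := by omega
    rw [e1]
    congr 1
    rw [zero_add, PySem.List.pyGetD_natCast]
  rw [pv_foldl_congr _ _ _ _ hbody]
  exact pv_setrows (fun k r => f (l.getD k []) r) off l.length M hlen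

-- A's splice fold over one contiguous index segment, flattened to an explicit list.
lemma pv_splice_flatten (rhs : Int → List Int) (N a b : Nat) (hab : a ≤ b)
    (M : List (List Int)) (hbM : b ≤ M.length) :
    (PySem.List.pyRange ((a : Nat) : Int) ((b : Nat) : Int) 1).foldl
      (fun M i => M.set i.toNat (rhs i ++ (M.getD i.toNat []).drop N)) M
    = M.take a ++ (List.range (b - a)).map (fun k => rhs (((a + k : Nat) : Int)) ++ (M.getD (a + k) []).drop N) ++ M.drop b := by
  rw [PySem.List.pyRange_one, show (((b : Nat) : Int) - ((a : Nat) : Int)).toNat = b - a by omega, List.foldl_map]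
  have hbody : ∀ (M : List (List Int)), ∀ k ∈ List.range (b - a),
      M.set (((a : Nat) : Int) + (k : Nat)).toNat (rhs (((a : Nat) : Int) + (k : Nat)) ++ (M.getD (((a : Nat) : Int) + (k : Nat)).toNat []).drop N)
      = M.set (a + k) (rhs (((a + k : Nat) : Int)) ++ (M.getD (a + k) []).drop N) := by
    intro M k _
    have e1 : (((a : Nat) : Int) + (k : Nat)).toNat = a + k := by omega
    have e2 : (((a : Nat) : Int) + (k : Nat)) = (((a + k : Nat) : Int)) := by push_cast; ring
    rw [e1, e2]
  rw [pv_foldl_congr _ _ _ _ hbody]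
  have := pv_setrows (fun k r => rhs (((a + k : Nat) : Int)) ++ r.drop N) a (b - a) M (by omega)
  rw [this, show a + (b - a) = b by omega]


-- A quadrant row fetched with pyGetD is among the first t rows, so it inherits their length bound.
lemma pv_pyGetD_row_len (l : List (List Int)) (t c : Nat) (i : Int)
    (h0 : 0 ≤ i) (hit : i < (t : Int)) (ht : t ≤ l.length)
    (hr : ∀ r ∈ l.take t, c ≤ r.length) : c ≤ (PySem.List.pyGetD l i []).length := by
  have hlt : i < (l.length : Int) := by omega
  rw [PySem.List.pyGetD_eq_getElem l [] h0 hlt]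
  have h1 : i.toNat < (l.take t).length := by simp; omega
  have h2 := List.getElem_mem h1
  rw [List.getElem_take] at h2
  exact hr _ h2

-- Reading rows 0..m-1 of a matrix is its m-prefix.
lemma pv_map_getD_take (M : List (List Int)) (m : Nat) (hm : m ≤ M.length) :
    (List.range m).map (fun k => M.getD k []) = M.take m := by
  apply List.ext_getElem
  · simp; omega
  · intro k h1 h2
    simp only [List.getElem_map, List.getElem_range, List.getElem_take]
    exact List.getD_eq_getElem M [] (by simp at h1; omega)

-- Named loop bodies of the two ports (so folds can be rewritten segment by segment).
def pvA (a11 a12 a21 a22 : List (List Int)) (n h : Nat) : List (List Int) → Int → List (List Int) :=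
  fun M i => (PySem.List.pyRange 0 (n : Int) 1).foldl (fun M j =>
    pvSetCell M i j
      (if i < (h : Int) then
        (if j < (h : Int) then PySem.List.pyGetD (PySem.List.pyGetD a11 i []) j 0
         else PySem.List.pyGetD (PySem.List.pyGetD a12 i []) (j - (h : Int)) 0)
      else
        (if j < (h : Int) then PySem.List.pyGetD (PySem.List.pyGetD a21 (i - (h : Int)) []) j 0
         else PySem.List.pyGetD (PySem.List.pyGetD a22 (i - (h : Int)) []) (j - (h : Int)) 0))) M

def pvRhs1 (a11 a12 : List (List Int)) (n h : Nat) (i : Int) : List Int :=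
  (PySem.List.pyGetD a11 i []).take h ++ (PySem.List.pyGetD a12 i []).take (n - h)

def pvRhs2 (a21 a22 : List (List Int)) (n h : Nat) (i : Int) : List Int :=
  (PySem.List.pyGetD a21 (i - (h : Int)) []).take h ++ (PySem.List.pyGetD a22 (i - (h : Int)) []).take (n - h)

def pvSpl (rhs : Int → List Int) (n : Nat) : List (List Int) → Int → List (List Int) :=
  fun M i => M.set i.toNat (rhs i ++ (M.getD i.toNat []).drop n)

lemma pv_spl_flatten (rhs : Int → List Int) (N a b : Nat) (hab : a ≤ b)
    (M : List (List Int)) (hbM : b ≤ M.length) :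
    (PySem.List.pyRange ((a : Nat) : Int) ((b : Nat) : Int) 1).foldl (pvSpl rhs N) M
    = M.take a ++ (List.range (b - a)).map (fun k => rhs (((a + k : Nat) : Int)) ++ (M.getD (a + k) []).drop N) ++ M.drop b :=
  pv_splice_flatten rhs N a b hab M hbM

lemma pv_spl_flatten0 (rhs : Int → List Int) (N b : Nat)
    (M : List (List Int)) (hbM : b ≤ M.length) :
    (PySem.List.pyRange 0 ((b : Nat) : Int) 1).foldl (pvSpl rhs N) M
    = (List.range b).map (fun k => rhs ((k : Nat) : Int) ++ (M.getD k []).drop N) ++ M.drop b := by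
  have h := pv_spl_flatten rhs N 0 b (Nat.zero_le _) M hbM
  simpa using h

-- B's left-half row-slice loop (A[off+i][:h] = row[:h]), flattened.
lemma pv_loopA0 (l : List (List Int)) (h : Nat) (M : List (List Int)) (hlen : l.length ≤ M.length) :
    (PySem.List.enumerate l 0).foldl
      (fun M p => M.set p.1.toNat (p.2.take h ++ (M.getD p.1.toNat []).drop h)) M
    = (List.range l.length).map (fun k => (l.getD k []).take h ++ (M.getD k []).drop h) ++ M.drop l.length :=
  pv_enum_setrows0 l (fun q r => q.take h ++ r.drop h) M hlen

lemma pv_loopAOff (l : List (List Int)) (off h : Nat) (M : List (List Int)) (hlen : off + l.length ≤ M.length) :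
    (PySem.List.enumerate l 0).foldl
      (fun M p => M.set (((off : Nat) : Int) + p.1).toNat (p.2.take h ++ (M.getD (((off : Nat) : Int) + p.1).toNat []).drop h)) M
    = M.take off ++ (List.range l.length).map (fun k => (l.getD k []).take h ++ (M.getD (off + k) []).drop h) ++ M.drop (off + l.length) :=
  pv_enum_setrows l off (fun q r => q.take h ++ r.drop h) M hlen

-- B's right-half row-slice loop (A[off+i][h:n] = row[:n-h]), flattened.
lemma pv_loopB0 (l : List (List Int)) (h n : Nat) (M : List (List Int)) (hlen : l.length ≤ M.length) :
    (PySem.List.enumerate l 0).foldl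
      (fun M p => M.set p.1.toNat ((M.getD p.1.toNat []).take h ++ p.2.take (n - h) ++ (M.getD p.1.toNat []).drop n)) M
    = (List.range l.length).map (fun k => (M.getD k []).take h ++ (l.getD k []).take (n - h) ++ (M.getD k []).drop n) ++ M.drop l.length :=
  pv_enum_setrows0 l (fun q r => r.take h ++ q.take (n - h) ++ r.drop n) M hlen

lemma pv_loopBOff (l : List (List Int)) (off h n : Nat) (M : List (List Int)) (hlen : off + l.length ≤ M.length) :
    (PySem.List.enumerate l 0).foldl
      (fun M p => M.set (((off : Nat) : Int) + p.1).toNat ((M.getD (((off : Nat) : Int) + p.1).toNat []).take h ++ p.2.take (n - h) ++ (M.getD (((off : Nat) : Int) + p.1).toNat []).drop n)) M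
    = M.take off ++ (List.range l.length).map (fun k => (M.getD (off + k) []).take h ++ (l.getD k []).take (n - h) ++ (M.getD (off + k) []).drop n) ++ M.drop (off + l.length) :=
  pv_enum_setrows l off (fun q r => r.take h ++ q.take (n - h) ++ r.drop n) M hlen

-- A loop that rewrites each of the first len(l) rows with its current value is the identity.
lemma pv_loop_id (l : List (List Int)) (M : List (List Int)) (hlen : l.length ≤ M.length) :
    (PySem.List.enumerate l 0).foldl
      (fun M p => M.set p.1.toNat (M.getD p.1.toNat [])) M = M := by
  have h := pv_enum_setrows0 l (fun _ r => r) M hlen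
  rw [h, pv_map_getD_take M l.length hlen, List.take_append_drop]

-- The assembled rows each side of the equivalence is reduced to.
def pvT1 (A a11 : List (List Int)) (h : Nat) (k : Nat) : List Int :=
  (a11.getD k []).take h ++ (A.getD k []).drop h

def pvT2 (A a11 a12 : List (List Int)) (n h : Nat) (k : Nat) : List Int :=
  (a11.getD k []).take h ++ ((a12.getD k []).take (n - h) ++ (A.getD k []).drop n)

def pvT3 (A a21 : List (List Int)) (h : Nat) (k : Nat) : List Int :=
  (a21.getD k []).take h ++ (A.getD (h + k) []).drop h

def pvT4 (A a21 a22 : List (List Int)) (n h : Nat) (k : Nat) : List Int :=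
  (a21.getD k []).take h ++ ((a22.getD k []).take (n - h) ++ (A.getD (h + k) []).drop n)

-- ===== VERDICT (by name: the statement is the Claim_ definition above) =====
theorem merge_matrices_spec : Claim_equal_merge_matrices := by
  intro A a11 a12 a21 a22 _ hpre
  unfold Spec_merge_matrices
  obtain ⟨hA, hn22, hq⟩ := hpre
  have hle : A.length / 2 ≤ A.length := Nat.div_le_self _ _
  have h11L : A.length / 2 ≤ a11.length := by
    by_cases hp : 0 < A.length / 2
    · exact (hq hp).1
    · omega
  have h12L : A.length / 2 ≤ a12.length := by
    by_cases hp : 0 < A.length / 2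
    · exact (hq hp).2.2.1
    · omega
  have h22L : A.length - A.length / 2 ≤ a22.length := by
    by_cases hp : 0 < A.length
    · exact (hn22 hp).1
    · omega
  have h11row : ∀ k, k < A.length / 2 → A.length / 2 ≤ (a11.getD k []).length := by
    intro k hk
    exact pv_getD_row_len a11 (A.length / 2) (A.length / 2) k hk h11L (hq (by omega)).2.1
  have h12row : ∀ k, k < A.length / 2 → A.length - A.length / 2 ≤ (a12.getD k []).length := by
    intro k hk
    exact pv_getD_row_len a12 (A.length / 2) (A.length - A.length / 2) k hk h12L (hq (by omega)).2.2.2.1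
  have h21row : ∀ k, k < A.length - A.length / 2 → A.length / 2 ≤ (a21.getD k []).length := by
    intro k hk
    by_cases hp : 0 < A.length / 2
    · exact pv_getD_row_len a21 (A.length - A.length / 2) (A.length / 2) k hk (hq hp).2.2.2.2.1 (hq hp).2.2.2.2.2
    · omega
  have hArow : ∀ k, k < A.length → A.length ≤ (A.getD k []).length := by
    intro k hk
    rw [List.getD_eq_getElem A [] hk]
    exact hA _ (List.getElem_mem hk)
  have hhalfcast : PySem.Int.floordiv ((A.length : Nat) : Int) 2 = ((A.length / 2 : Nat) : Int) := by
    exact_mod_cast PySem.Int.floordiv_natCast A.length 2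
  have hnhcast : ((A.length : Nat) : Int) - ((A.length / 2 : Nat) : Int) = ((A.length - A.length / 2 : Nat) : Int) := by
    omega
  -- ===== A reduces to the assembled rows =====
  have hAside : merge_matrices A a11 a12 a21 a22
      = (List.range (A.length / 2)).map (pvT2 A a11 a12 A.length (A.length / 2))
        ++ (List.range (A.length - A.length / 2)).map (pvT4 A a21 a22 A.length (A.length / 2)) := by
    simp only [merge_matrices, hhalfcast]
    have hsplit : ∀ f : List (List Int) → Int → List (List Int),
        (PySem.List.pyRange 0 ((A.length : Nat) : Int) 1).foldl f A
        = (PySem.List.pyRange ((A.length / 2 : Nat) : Int) ((A.length : Nat) : Int) 1).foldl f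
            ((PySem.List.pyRange 0 ((A.length / 2 : Nat) : Int) 1).foldl f A) := by
      intro f
      rw [PySem.List.pyRange_one_append 0 ((A.length / 2 : Nat) : Int) ((A.length : Nat) : Int)
          (by exact_mod_cast Nat.zero_le _) (by exact_mod_cast hle), List.foldl_append]
    rw [hsplit]
    show (PySem.List.pyRange ((A.length / 2 : Nat) : Int) ((A.length : Nat) : Int) 1).foldl
          (pvA a11 a12 a21 a22 A.length (A.length / 2))
          ((PySem.List.pyRange 0 ((A.length / 2 : Nat) : Int) 1).foldl
            (pvA a11 a12 a21 a22 A.length (A.length / 2)) A) = _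
    have hseg1 : (PySem.List.pyRange 0 ((A.length / 2 : Nat) : Int) 1).foldl
          (pvA a11 a12 a21 a22 A.length (A.length / 2)) A
        = (PySem.List.pyRange 0 ((A.length / 2 : Nat) : Int) 1).foldl
            (pvSpl (pvRhs1 a11 a12 A.length (A.length / 2)) A.length) A := by
      refine Eq.trans (pv_foldl_congr _ (fun M i =>
          (PySem.List.pyRange 0 ((A.length : Nat) : Int) 1).foldl (fun M j =>
            pvSetCell M i j
              (if j < ((A.length / 2 : Nat) : Int) then PySem.List.pyGetD (PySem.List.pyGetD a11 i []) j 0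
               else PySem.List.pyGetD (PySem.List.pyGetD a12 i []) (j - ((A.length / 2 : Nat) : Int)) 0)) M)
          A _ ?_) (pv_seg_eq A.length _ (pvRhs1 a11 a12 A.length (A.length / 2)) _ A ?_ hA ?_ ?_)
      · intro M i hi
        have hi' := PySem.List.mem_pyRange_one.mp hi
        simp only [pvA, if_pos hi'.2]
      · intro i hi
        have hi' := PySem.List.mem_pyRange_one.mp hi
        exact ⟨hi'.1, by omega⟩
      · intro i hi
        have hi' := PySem.List.mem_pyRange_one.mp hi
        have l1 := pv_pyGetD_row_len a11 (A.length / 2) (A.length / 2) i hi'.1 hi'.2 h11L (hq (by omega)).2.1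
        have l2 := pv_pyGetD_row_len a12 (A.length / 2) (A.length - A.length / 2) i hi'.1 hi'.2 h12L (hq (by omega)).2.2.2.1
        simp only [pvRhs1, List.length_append, List.length_take]
        omega
      · intro i hi
        have hi' := PySem.List.mem_pyRange_one.mp hi
        have l1 := pv_pyGetD_row_len a11 (A.length / 2) (A.length / 2) i hi'.1 hi'.2 h11L (hq (by omega)).2.1
        have l2 := pv_pyGetD_row_len a12 (A.length / 2) (A.length - A.length / 2) i hi'.1 hi'.2 h12L (hq (by omega)).2.2.2.1
        have h := pv_map_range_two_blocks A.length (A.length / 2)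
          (PySem.List.pyGetD a11 i []) (PySem.List.pyGetD a12 i []) hle l1 l2
        simpa only [zero_add, pvRhs1] using h
    rw [hseg1, pv_spl_flatten0 (pvRhs1 a11 a12 A.length (A.length / 2)) A.length (A.length / 2) A hle]
    have hlenS1 : ((List.range (A.length / 2)).map (fun k => pvRhs1 a11 a12 A.length (A.length / 2) ((k : Nat) : Int) ++ (A.getD k []).drop A.length) ++ A.drop (A.length / 2)).length = A.length := by
      simp
      omega
    have hrowS1 : ∀ r ∈ (List.range (A.length / 2)).map (fun k => pvRhs1 a11 a12 A.length (A.length / 2) ((k : Nat) : Int) ++ (A.getD k []).drop A.length) ++ A.drop (A.length / 2), A.length ≤ r.length := by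
      intro r hr
      rcases List.mem_append.mp hr with h | h
      · obtain ⟨k, hk, rfl⟩ := List.mem_map.mp h
        have hk' := List.mem_range.mp hk
        have l1 := h11row k hk'
        have l2 := h12row k hk'
        simp only [pvRhs1, PySem.List.pyGetD_natCast, List.length_append, List.length_take]
        omega
      · exact hA r (List.mem_of_mem_drop h)
    have hseg2 : (PySem.List.pyRange ((A.length / 2 : Nat) : Int) ((A.length : Nat) : Int) 1).foldl
          (pvA a11 a12 a21 a22 A.length (A.length / 2))
          ((List.range (A.length / 2)).map (fun k => pvRhs1 a11 a12 A.length (A.length / 2) ((k : Nat) : Int) ++ (A.getD k []).drop A.length) ++ A.drop (A.length / 2))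
        = (PySem.List.pyRange ((A.length / 2 : Nat) : Int) ((A.length : Nat) : Int) 1).foldl
            (pvSpl (pvRhs2 a21 a22 A.length (A.length / 2)) A.length)
            ((List.range (A.length / 2)).map (fun k => pvRhs1 a11 a12 A.length (A.length / 2) ((k : Nat) : Int) ++ (A.getD k []).drop A.length) ++ A.drop (A.length / 2)) := by
      refine Eq.trans (pv_foldl_congr _ (fun M i =>
          (PySem.List.pyRange 0 ((A.length : Nat) : Int) 1).foldl (fun M j =>
            pvSetCell M i j
              (if j < ((A.length / 2 : Nat) : Int) then PySem.List.pyGetD (PySem.List.pyGetD a21 (i - ((A.length / 2 : Nat) : Int)) []) j 0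
               else PySem.List.pyGetD (PySem.List.pyGetD a22 (i - ((A.length / 2 : Nat) : Int)) []) (j - ((A.length / 2 : Nat) : Int)) 0)) M)
          _ _ ?_) (pv_seg_eq A.length _ (pvRhs2 a21 a22 A.length (A.length / 2)) _ _ ?_ hrowS1 ?_ ?_)
      · intro M i hi
        have hi' := PySem.List.mem_pyRange_one.mp hi
        simp only [pvA, if_neg (by omega : ¬ i < ((A.length / 2 : Nat) : Int))]
      · intro i hi
        have hi' := PySem.List.mem_pyRange_one.mp hi
        refine ⟨by omega, ?_⟩
        rw [hlenS1]
        omega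
      · intro i hi
        have hi' := PySem.List.mem_pyRange_one.mp hi
        have l1 : A.length / 2 ≤ (PySem.List.pyGetD a21 (i - ((A.length / 2 : Nat) : Int)) []).length := by
          by_cases hp : 0 < A.length / 2
          · exact pv_pyGetD_row_len a21 (A.length - A.length / 2) (A.length / 2) (i - ((A.length / 2 : Nat) : Int))
              (by omega) (by omega) (hq hp).2.2.2.2.1 (hq hp).2.2.2.2.2
          · omega
        have l2 : A.length - A.length / 2 ≤ (PySem.List.pyGetD a22 (i - ((A.length / 2 : Nat) : Int)) []).length :=
          pv_pyGetD_row_len a22 (A.length - A.length / 2) (A.length - A.length / 2) (i - ((A.length / 2 : Nat) : Int))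
            (by omega) (by omega) h22L (hn22 (by omega)).2
        simp only [pvRhs2, List.length_append, List.length_take]
        omega
      · intro i hi
        have hi' := PySem.List.mem_pyRange_one.mp hi
        have l1 : A.length / 2 ≤ (PySem.List.pyGetD a21 (i - ((A.length / 2 : Nat) : Int)) []).length := by
          by_cases hp : 0 < A.length / 2
          · exact pv_pyGetD_row_len a21 (A.length - A.length / 2) (A.length / 2) (i - ((A.length / 2 : Nat) : Int))
              (by omega) (by omega) (hq hp).2.2.2.2.1 (hq hp).2.2.2.2.2
          · omega
        have l2 : A.length - A.length / 2 ≤ (PySem.List.pyGetD a22 (i - ((A.length / 2 : Nat) : Int)) []).length :=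
          pv_pyGetD_row_len a22 (A.length - A.length / 2) (A.length - A.length / 2) (i - ((A.length / 2 : Nat) : Int))
            (by omega) (by omega) h22L (hn22 (by omega)).2
        have h := pv_map_range_two_blocks A.length (A.length / 2)
          (PySem.List.pyGetD a21 (i - ((A.length / 2 : Nat) : Int)) [])
          (PySem.List.pyGetD a22 (i - ((A.length / 2 : Nat) : Int)) []) hle l1 l2
        simpa only [zero_add, pvRhs2] using h
    rw [hseg2, pv_spl_flatten (pvRhs2 a21 a22 A.length (A.length / 2)) A.length (A.length / 2) A.length hle _ (le_of_eq hlenS1.symm)]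
    rw [pv_take_append _ _ _ (by simp)]
    rw [show ((List.range (A.length / 2)).map (fun k => pvRhs1 a11 a12 A.length (A.length / 2) ((k : Nat) : Int) ++ (A.getD k []).drop A.length) ++ A.drop (A.length / 2)).drop A.length = ([] : List (List Int)) from by
          rw [pv_drop_append _ _ _ (by simp <;> omega)]
          apply List.drop_eq_nil_of_le
          simp <;> omega]
    rw [List.append_nil]
    refine congrArg₂ (· ++ ·) ?_ ?_
    · apply List.map_congr_left
      intro k hk
      simp only [pvRhs1, pvT2, PySem.List.pyGetD_natCast, List.append_assoc]
    · apply List.map_congr_left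
      intro k hk
      have hk' := List.mem_range.mp hk
      have hgd : ((List.range (A.length / 2)).map (fun k => pvRhs1 a11 a12 A.length (A.length / 2) ((k : Nat) : Int) ++ (A.getD k []).drop A.length) ++ A.drop (A.length / 2)).getD (A.length / 2 + k) [] = A.getD (A.length / 2 + k) [] := by
        rw [show A.length / 2 + k = ((List.range (A.length / 2)).map (fun k => pvRhs1 a11 a12 A.length (A.length / 2) ((k : Nat) : Int) ++ (A.getD k []).drop A.length)).length + k from by simp,
            pv_getD_append_right, pv_getD_drop]
        simp
      rw [hgd]
      simp only [pvRhs2, pvT4]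
      rw [show (((A.length / 2 + k : Nat)) : Int) - ((A.length / 2 : Nat) : Int) = ((k : Nat) : Int) from by push_cast; ring]
      simp only [PySem.List.pyGetD_natCast, List.append_assoc]
  -- ===== B reduces to the same assembled rows =====
  have hBside : merge_matrices_alt A a11 a12 a21 a22
      = (List.range (A.length / 2)).map (pvT2 A a11 a12 A.length (A.length / 2))
        ++ (List.range (A.length - A.length / 2)).map (pvT4 A a21 a22 A.length (A.length / 2)) := by
    by_cases hz : 0 < A.length / 2
    · -- both blocks are present
      have h21L := (hq hz).2.2.2.2.1
      simp only [merge_matrices_alt, hhalfcast, hnhcast, PySem.List.slice_to_natCast, PySem.List.slice_from_natCast]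
      rw [pv_loopA0 (a11.take (A.length / 2)) (A.length / 2) A (by simp <;> omega)]
      rw [show (a11.take (A.length / 2)).length = A.length / 2 from by simp <;> omega]
      rw [show (List.range (A.length / 2)).map (fun k => ((a11.take (A.length / 2)).getD k []).take (A.length / 2) ++ (A.getD k []).drop (A.length / 2))
            = (List.range (A.length / 2)).map (pvT1 A a11 (A.length / 2)) from
          List.map_congr_left (by
            intro k hk
            have hk' := List.mem_range.mp hk
            simp only [pvT1, pv_getD_take a11 (A.length / 2) k ([] : List Int) hk'])]
      rw [pv_loopB0 (a12.take (A.length / 2)) (A.length / 2) A.length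
            ((List.range (A.length / 2)).map (pvT1 A a11 (A.length / 2)) ++ A.drop (A.length / 2)) (by simp <;> omega)]
      rw [show (a12.take (A.length / 2)).length = A.length / 2 from by simp <;> omega]
      have hbody2 : ∀ k ∈ List.range (A.length / 2),
          (((List.range (A.length / 2)).map (pvT1 A a11 (A.length / 2)) ++ A.drop (A.length / 2)).getD k []).take (A.length / 2)
            ++ ((a12.take (A.length / 2)).getD k []).take (A.length - A.length / 2)
            ++ (((List.range (A.length / 2)).map (pvT1 A a11 (A.length / 2)) ++ A.drop (A.length / 2)).getD k []).drop A.length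
          = pvT2 A a11 a12 A.length (A.length / 2) k := by
        intro k hk
        have hk' := List.mem_range.mp hk
        have e0 : ((List.range (A.length / 2)).map (pvT1 A a11 (A.length / 2)) ++ A.drop (A.length / 2)).getD k [] = pvT1 A a11 (A.length / 2) k := by
          rw [pv_getD_append_left _ _ _ _ (by simp <;> omega), PySem.List.getD_map_range _ _ _ _ hk']
        rw [e0, pv_getD_take _ _ _ _ hk']
        have h1 := h11row k hk'
        have e1 : (pvT1 A a11 (A.length / 2) k).take (A.length / 2) = (a11.getD k []).take (A.length / 2) := by
          apply pv_take_append
          rw [List.length_take]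
          omega
        have e2 : (pvT1 A a11 (A.length / 2) k).drop A.length = (A.getD k []).drop A.length := by
          simp only [pvT1]
          rw [pv_drop_append _ _ _ (by simp <;> omega)]
          rw [List.drop_drop]
          congr 1
          rw [List.length_take]
          omega
        rw [e1, e2]
        simp only [pvT2, List.append_assoc]
      rw [List.map_congr_left hbody2]
      rw [show ((List.range (A.length / 2)).map (pvT1 A a11 (A.length / 2)) ++ A.drop (A.length / 2)).drop (A.length / 2) = A.drop (A.length / 2) from by
            rw [pv_drop_append _ _ _ (by simp)]
            simp]
      rw [pv_loopAOff (a21.take (A.length - A.length / 2)) (A.length / 2) (A.length / 2)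
            ((List.range (A.length / 2)).map (pvT2 A a11 a12 A.length (A.length / 2)) ++ A.drop (A.length / 2)) (by simp <;> omega)]
      rw [show (a21.take (A.length - A.length / 2)).length = A.length - A.length / 2 from by simp <;> omega]
      rw [pv_take_append ((List.range (A.length / 2)).map (pvT2 A a11 a12 A.length (A.length / 2))) (A.drop (A.length / 2)) (A.length / 2) (by simp)]
      have hbody3 : ∀ k ∈ List.range (A.length - A.length / 2),
          ((a21.take (A.length - A.length / 2)).getD k []).take (A.length / 2)
            ++ (((List.range (A.length / 2)).map (pvT2 A a11 a12 A.length (A.length / 2)) ++ A.drop (A.length / 2)).getD (A.length / 2 + k) []).drop (A.length / 2)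
          = pvT3 A a21 (A.length / 2) k := by
        intro k hk
        have hk' := List.mem_range.mp hk
        rw [pv_getD_take _ _ _ _ hk']
        rw [show A.length / 2 + k = ((List.range (A.length / 2)).map (pvT2 A a11 a12 A.length (A.length / 2))).length + k from by simp,
            pv_getD_append_right, pv_getD_drop]
        simp only [pvT3]
      rw [List.map_congr_left hbody3]
      rw [show ((List.range (A.length / 2)).map (pvT2 A a11 a12 A.length (A.length / 2)) ++ A.drop (A.length / 2)).drop (A.length / 2 + (A.length - A.length / 2)) = ([] : List (List Int)) from by
            rw [pv_drop_append _ _ _ (by simp <;> omega)]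
            apply List.drop_eq_nil_of_le
            simp <;> omega]
      rw [List.append_nil]
      rw [pv_loopBOff (a22.take (A.length - A.length / 2)) (A.length / 2) (A.length / 2) A.length
            ((List.range (A.length / 2)).map (pvT2 A a11 a12 A.length (A.length / 2)) ++ (List.range (A.length - A.length / 2)).map (pvT3 A a21 (A.length / 2))) (by simp <;> omega)]
      rw [show (a22.take (A.length - A.length / 2)).length = A.length - A.length / 2 from by simp <;> omega]
      rw [pv_take_append ((List.range (A.length / 2)).map (pvT2 A a11 a12 A.length (A.length / 2))) ((List.range (A.length - A.length / 2)).map (pvT3 A a21 (A.length / 2))) (A.length / 2) (by simp)]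
      have hbody4 : ∀ k ∈ List.range (A.length - A.length / 2),
          (((List.range (A.length / 2)).map (pvT2 A a11 a12 A.length (A.length / 2)) ++ (List.range (A.length - A.length / 2)).map (pvT3 A a21 (A.length / 2))).getD (A.length / 2 + k) []).take (A.length / 2)
            ++ ((a22.take (A.length - A.length / 2)).getD k []).take (A.length - A.length / 2)
            ++ (((List.range (A.length / 2)).map (pvT2 A a11 a12 A.length (A.length / 2)) ++ (List.range (A.length - A.length / 2)).map (pvT3 A a21 (A.length / 2))).getD (A.length / 2 + k) []).drop A.length
          = pvT4 A a21 a22 A.length (A.length / 2) k := by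
        intro k hk
        have hk' := List.mem_range.mp hk
        have e0 : ((List.range (A.length / 2)).map (pvT2 A a11 a12 A.length (A.length / 2)) ++ (List.range (A.length - A.length / 2)).map (pvT3 A a21 (A.length / 2))).getD (A.length / 2 + k) [] = pvT3 A a21 (A.length / 2) k := by
          rw [show A.length / 2 + k = ((List.range (A.length / 2)).map (pvT2 A a11 a12 A.length (A.length / 2))).length + k from by simp,
              pv_getD_append_right, PySem.List.getD_map_range _ _ _ _ hk']
        rw [e0, pv_getD_take _ _ _ _ hk']
        have h1 := h21row k hk'
        have e1 : (pvT3 A a21 (A.length / 2) k).take (A.length / 2) = (a21.getD k []).take (A.length / 2) := by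
          apply pv_take_append
          rw [List.length_take]
          omega
        have e2 : (pvT3 A a21 (A.length / 2) k).drop A.length = (A.getD (A.length / 2 + k) []).drop A.length := by
          simp only [pvT3]
          rw [pv_drop_append _ _ _ (by simp <;> omega)]
          rw [List.drop_drop]
          congr 1
          rw [List.length_take]
          omega
        rw [e1, e2]
        simp only [pvT4, List.append_assoc]
      rw [List.map_congr_left hbody4]
      rw [show ((List.range (A.length / 2)).map (pvT2 A a11 a12 A.length (A.length / 2)) ++ (List.range (A.length - A.length / 2)).map (pvT3 A a21 (A.length / 2))).drop (A.length / 2 + (A.length - A.length / 2)) = ([] : List (List Int)) from by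
            rw [pv_drop_append _ _ _ (by simp <;> omega)]
            apply List.drop_eq_nil_of_le
            simp <;> omega]
      rw [List.append_nil]
    · -- n ≤ 1: the left blocks are empty and only the a22 block is copied
      have hz0 : A.length / 2 = 0 := by omega
      simp only [merge_matrices_alt, hhalfcast, hnhcast, PySem.List.slice_to_natCast, PySem.List.slice_from_natCast]
      simp only [hz0, Nat.cast_zero, zero_add, Nat.sub_zero, List.take_zero, List.drop_zero,
        List.nil_append, PySem.List.enumerate_nil, List.foldl_nil, List.range_zero, List.map_nil]
      rw [pv_loop_id (a21.take A.length) A (by simp)]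
      rw [pv_loopA0 (a22.take A.length) A.length A (by simp)]
      rw [show (a22.take A.length).length = A.length from by simp <;> omega]
      rw [show A.drop A.length = ([] : List (List Int)) from by simp]
      rw [List.append_nil]
      apply List.map_congr_left
      intro k hk
      have hk' := List.mem_range.mp hk
      rw [pv_getD_take _ _ _ _ hk']
      simp only [pvT4, List.take_zero, List.nil_append, Nat.sub_zero, zero_add]
  rw [hAside, hBside]
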